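-- pv_equiv track=rewrite | github.com/boldijar/babes-info-romana | Fundamentele programarii/s12p1/s12p1/src/rec/main.py | replace_with_list_2
-- ===== SOURCE A (Python) =====
-- def replace_with_list_2(l, e, l2, l3):
--     """Replace all occurrences of an element e from a list l with the elements from another list l2.
--     Without concatenating the entire list l2 to the result.
--     l3 - an auxiliary list equal to the initial list l2.
--     """
--     if l == []:
--         return []
--     if l[0] != e:
--         return [l[0]] + replace_with_list_2(l[1:], e, l2, l3)
--     if l2 == []:
--         return replace_with_list_2(l[1:], e, l3, l3)
--
--     return [l2[0]] + replace_with_list_2(l, e, l2[1:], l3)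
-- ===== SOURCE B (Python) =====
-- def replace_with_list_2(l, e, l2, l3):
--     out = []
--     cur = l2
--     for x in l:
--         if x != e:
--             out.append(x)
--         else:
--             out.extend(cur)
--             cur = l3
--     return out
-- ===== Notes on version B (the rewrite author's own statement) =====
-- stated objective: faster
-- what changed: Replaces A's slice-and-concat recursion (which rebuilds list tails with l[1:]/l2[1:] and concatenations at each step) by a single iterative left-to-right pass maintaining an output accumulator and a 'current' replacement buffer that starts as l2 and becomes l3 after the first occurrence of e.
import Mathlib
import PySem

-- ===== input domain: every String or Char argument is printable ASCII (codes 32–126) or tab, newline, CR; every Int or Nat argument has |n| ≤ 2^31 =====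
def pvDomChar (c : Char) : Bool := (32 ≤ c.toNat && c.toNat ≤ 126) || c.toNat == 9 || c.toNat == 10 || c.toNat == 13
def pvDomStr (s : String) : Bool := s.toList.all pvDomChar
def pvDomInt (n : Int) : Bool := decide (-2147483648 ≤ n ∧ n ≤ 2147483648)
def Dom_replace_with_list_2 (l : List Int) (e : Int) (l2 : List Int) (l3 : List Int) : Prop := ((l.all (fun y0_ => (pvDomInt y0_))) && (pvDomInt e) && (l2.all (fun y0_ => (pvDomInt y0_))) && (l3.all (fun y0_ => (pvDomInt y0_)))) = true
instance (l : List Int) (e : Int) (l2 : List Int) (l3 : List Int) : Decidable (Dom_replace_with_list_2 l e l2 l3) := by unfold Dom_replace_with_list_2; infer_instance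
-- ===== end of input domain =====

-- B replaces A's slice-and-concat recursion by a single iterative pass with an
-- output accumulator and a 'current' replacement buffer (l2 first, l3 after).

-- ===== PORT A =====
-- literal transliteration of A's recursion (l[1:] / l2[1:] become tail patterns)
def replace_with_list_2 (l : List Int) (e : Int) (l2 : List Int) (l3 : List Int) : List Int :=
  match l with
  | [] => []
  | x :: xs =>
    if x ≠ e then [x] ++ replace_with_list_2 xs e l2 l3
    else match l2 with
      | [] => replace_with_list_2 xs e l3 l3
      | y :: ys => [y] ++ replace_with_list_2 (x :: xs) e ys l3
termination_by (l.length, l2.length)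

-- ===== PORT B =====
-- the loop of Source B: state = (out, cur); out grows at the right as in Python
def replaceLoop (l : List Int) (e : Int) (l3 : List Int)
    (out : List Int) (cur : List Int) : List Int :=
  match l with
  | [] => out
  | x :: xs =>
    if x ≠ e then replaceLoop xs e l3 (out ++ [x]) cur
    else replaceLoop xs e l3 (out ++ cur) l3

def replace_with_list_2_alt (l : List Int) (e : Int) (l2 : List Int) (l3 : List Int) : List Int :=
  replaceLoop l e l3 [] l2

-- ===== PRECONDITION & SPEC =====
def Spec_replace_with_list_2 (l : List Int) (e : Int) (l2 : List Int) (l3 : List Int) (out : List Int) : Prop := out = replace_with_list_2_alt l e l2 l3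
instance (l : List Int) (e : Int) (l2 : List Int) (l3 : List Int) (out : List Int) : Decidable (Spec_replace_with_list_2 l e l2 l3 out) := by unfold Spec_replace_with_list_2; infer_instance

-- ===== CLAIM (what is proved, stated in full; the proofs are below) =====
def Claim_equal_replace_with_list_2 : Prop := ∀ (l : List Int) (e : Int) (l2 : List Int) (l3 : List Int), Dom_replace_with_list_2 l e l2 l3 → Spec_replace_with_list_2 l e l2 l3 (replace_with_list_2 l e l2 l3)

-- ===== LEMMAS AND PROOFS =====

-- A on an occurrence of e emits the whole current buffer l2, then continues with l3
theorem portA_cons_eq (xs : List Int) (e : Int) (l2 l3 : List Int) :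
    replace_with_list_2 (e :: xs) e l2 l3 = l2 ++ replace_with_list_2 xs e l3 l3 := by
  induction l2 with
  | nil => simp [replace_with_list_2]
  | cons y ys ih => simp [replace_with_list_2, ih]

theorem portA_cons_ne (x : Int) (xs : List Int) (e : Int) (l2 l3 : List Int) (h : x ≠ e) :
    replace_with_list_2 (x :: xs) e l2 l3 = x :: replace_with_list_2 xs e l2 l3 := by
  rw [replace_with_list_2.eq_def]; simp [h]

-- the loop invariant: the accumulator is a prefix of the final result
theorem replaceLoop_eq (l : List Int) (e : Int) (l3 out cur : List Int) :
    replaceLoop l e l3 out cur = out ++ replace_with_list_2 l e cur l3 := by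
  induction l generalizing out cur with
  | nil => simp [replaceLoop, replace_with_list_2]
  | cons x xs ih =>
    by_cases h : x = e
    · subst h
      simp [replaceLoop, ih, portA_cons_eq]
    · simp [replaceLoop, h, ih, portA_cons_ne _ _ _ _ _ h]

-- ===== VERDICT (by name: the statement is the Claim_ definition above) =====
theorem replace_with_list_2_spec : Claim_equal_replace_with_list_2 := by
  intro l e l2 l3 _
  unfold Spec_replace_with_list_2 replace_with_list_2_alt
  simp [replaceLoop_eq]
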